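-- pv_equiv track=rewrite | github.com/karims7/Persona-Agent | dialogue_synthesizer.py | _pair_personas_with_dialogues
-- ===== SOURCE A (Python) =====
-- def _pair_personas_with_dialogues(
--     personas: list[dict], dialogues: list[dict]
-- ) -> list[tuple[dict, dict]]:
--     """Pair each persona with a base dialogue (round-robin on dialogues).
--
--     Args:
--         personas: List of persona dicts.
--         dialogues: List of base dialogue dicts.
--
--     Returns:
--         List of (persona, dialogue) tuples.
--     """
--     if not dialogues:
--         return []
--     n_dialogues = len(dialogues)
--     return [
--         (persona, dialogues[i % n_dialogues])
--         for i, persona in enumerate(personas)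
--     ]
-- ===== SOURCE B (Python) =====
-- def _pair_personas_with_dialogues(personas, dialogues):
--     """Pair each persona with a base dialogue (round-robin on dialogues)."""
--     out = []
--     cur = []
--     for persona in personas:
--         if not cur:
--             if not dialogues:
--                 break
--             cur = list(reversed(dialogues))
--         out.append((persona, cur.pop()))
--     return out
-- ===== Notes on version B (the rewrite author's own statement) =====
-- stated objective: alternative
-- what changed: B maintains a depleting cyclic buffer of dialogues (refilled when exhausted) and consumes one element per persona, instead of enumerating personas and indexing dialogues with i % n.
import Mathlib
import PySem

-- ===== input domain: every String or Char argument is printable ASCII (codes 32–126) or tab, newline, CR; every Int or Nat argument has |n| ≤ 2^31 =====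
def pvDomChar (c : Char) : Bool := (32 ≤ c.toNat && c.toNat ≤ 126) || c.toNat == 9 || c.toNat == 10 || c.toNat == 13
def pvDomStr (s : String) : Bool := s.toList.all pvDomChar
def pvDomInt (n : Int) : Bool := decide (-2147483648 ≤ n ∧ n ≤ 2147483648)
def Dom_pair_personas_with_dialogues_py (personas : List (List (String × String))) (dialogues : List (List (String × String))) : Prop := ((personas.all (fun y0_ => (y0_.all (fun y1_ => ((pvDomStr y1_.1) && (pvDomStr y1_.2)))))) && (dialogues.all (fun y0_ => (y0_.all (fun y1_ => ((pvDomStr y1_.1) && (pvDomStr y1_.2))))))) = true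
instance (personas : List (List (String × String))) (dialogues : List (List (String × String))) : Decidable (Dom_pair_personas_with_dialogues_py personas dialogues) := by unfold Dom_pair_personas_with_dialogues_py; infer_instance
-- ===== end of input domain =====

-- B replaces A's enumerate + i % n indexing by a depleting cyclic buffer of dialogues,
-- refilled when exhausted (objective: alternative traversal, same cost).

-- ===== PORT A =====
-- dialogues[i % n_dialogues]: the index is always in range (0 ≤ i % n < n), so pyGetD with
-- an unused default is exact here.
def pair_personas_with_dialogues_py (personas : List (List (String × String))) (dialogues : List (List (String × String))) : List ((List (String × String)) × (List (String × String))) :=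
  if dialogues = [] then []
  else
    let n_dialogues : Int := dialogues.length
    (PySem.List.enumerate personas).map
      (fun ip => (ip.2, PySem.List.pyGetD dialogues (PySem.Int.mod ip.1 n_dialogues) []))

-- ===== PORT B =====
-- 'cur' is the not-yet-consumed part of the current cycle (Source B keeps it reversed and pops
-- from the end, which is exactly taking the head of this suffix); when empty it is refilled
-- from dialogues, and an empty dialogues list breaks out of the loop.
def pairAltGo (dialogues : List (List (String × String))) :
    List (List (String × String)) → List (List (String × String)) →
    List ((List (String × String)) × (List (String × String)))
  | [], _ => []
  | p :: ps, [] =>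
      match dialogues with
      | [] => []
      | d :: ds => (p, d) :: pairAltGo dialogues ps ds
  | p :: ps, d :: ds => (p, d) :: pairAltGo dialogues ps ds

def pair_personas_with_dialogues_py_alt (personas : List (List (String × String))) (dialogues : List (List (String × String))) : List ((List (String × String)) × (List (String × String))) :=
  pairAltGo dialogues personas []

-- ===== PRECONDITION & SPEC =====
def Spec_pair_personas_with_dialogues_py (personas : List (List (String × String))) (dialogues : List (List (String × String))) (out : List ((List (String × String)) × (List (String × String)))) : Prop := out = pair_personas_with_dialogues_py_alt personas dialogues
instance (personas : List (List (String × String))) (dialogues : List (List (String × String))) (out : List ((List (String × String)) × (List (String × String)))) : Decidable (Spec_pair_personas_with_dialogues_py personas dialogues out) := by unfold Spec_pair_personas_with_dialogues_py; infer_instance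

-- ===== CLAIM (what is proved, stated in full; the proofs are below) =====
def Claim_equal_pair_personas_with_dialogues_py : Prop := ∀ (personas : List (List (String × String))) (dialogues : List (List (String × String))), Dom_pair_personas_with_dialogues_py personas dialogues → Spec_pair_personas_with_dialogues_py personas dialogues (pair_personas_with_dialogues_py personas dialogues)

-- ===== LEMMAS AND PROOFS =====

-- Loop invariant: when the remaining cycle buffer is D.drop k with k ≡ s (mod n), the
-- buffer-consuming loop produces exactly A's (persona, D[i % n]) pairs from start index s.
theorem pairAltGo_invariant (D : List (List (String × String))) (hD : D ≠ [])
    (ps : List (List (String × String))) :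
    ∀ (s k : Nat), k ≤ D.length → k % D.length = s % D.length →
      pairAltGo D ps (D.drop k)
        = (PySem.List.enumerate ps (s : Int)).map
            (fun ip => (ip.2, PySem.List.pyGetD D (PySem.Int.mod ip.1 (D.length : Int)) [])) := by
  induction ps with
  | nil => intro s k _ _; simp [pairAltGo, PySem.List.enumerate]
  | cons p ps ih =>
    intro s k hk hmod
    have hn : 0 < D.length := List.length_pos_of_ne_nil hD
    have hhead : PySem.List.pyGetD D (PySem.Int.mod (s : Int) (D.length : Int)) []
        = D[s % D.length]'(Nat.mod_lt _ hn) := by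
      rw [PySem.Int.mod_natCast, PySem.List.pyGetD_natCast]
      exact List.getD_eq_getElem _ _ (Nat.mod_lt _ hn)
    rcases Nat.lt_or_ge k D.length with hlt | hge
    · -- buffer still nonempty: consume its head D[k]
      have hdrop : D.drop k = D[k] :: D.drop (k + 1) := List.drop_eq_getElem_cons hlt
      have hk1 : k + 1 ≤ D.length := hlt
      have hmod1 : (k + 1) % D.length = (s + 1) % D.length := by
        rw [Nat.add_mod, hmod, ← Nat.add_mod]
      rw [hdrop]
      show (p, D[k]) :: pairAltGo D ps (D.drop (k + 1)) = _
      rw [ih (s + 1) (k + 1) hk1 hmod1]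
      have hks : k = s % D.length := by
        rw [← Nat.mod_eq_of_lt hlt, hmod]
      have : D[k] = D[s % D.length]'(Nat.mod_lt _ hn) := by
        congr 1
      rw [PySem.List.enumerate_cons, List.map_cons]
      simp only [hhead, this]
      norm_cast
    · -- buffer exhausted (k = n): refill from D
      have hkn : k = D.length := le_antisymm hk hge
      have hdrop : D.drop k = [] := by rw [hkn, List.drop_length]
      rw [hdrop]
      obtain ⟨d, ds, rfl⟩ := List.exists_cons_of_ne_nil hD
      show (p, d) :: pairAltGo (d :: ds) ps ds = _
      have hs0 : s % (d :: ds).length = 0 := by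
        have := hmod; rw [hkn] at this; simpa [Nat.mod_self] using this.symm
      have h1 := ih (s + 1) 1 (by simp)
        (by conv_rhs => rw [Nat.add_mod, hs0]
            simp [Nat.mod_mod_of_dvd])
      simp only [List.drop_succ_cons, List.drop_zero] at h1
      rw [h1]
      have hhd : PySem.List.pyGetD (d :: ds) (PySem.Int.mod (s : Int) ((d :: ds).length : Int)) [] = d := by
        rw [PySem.Int.mod_natCast, hs0]
        simp
      rw [PySem.List.enumerate_cons, List.map_cons]
      simp only [hhd]
      norm_cast

-- ===== VERDICT (by name: the statement is the Claim_ definition above) =====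
theorem pair_personas_with_dialogues_py_spec : Claim_equal_pair_personas_with_dialogues_py := by
  intro personas dialogues _
  unfold Spec_pair_personas_with_dialogues_py
  unfold pair_personas_with_dialogues_py pair_personas_with_dialogues_py_alt
  by_cases hD : dialogues = []
  · subst hD
    induction personas with
    | nil => rfl
    | cons p ps ih => simp [pairAltGo]
  · rw [if_neg hD]
    have h := pairAltGo_invariant dialogues hD personas 0 dialogues.length
      le_rfl (by simp [Nat.mod_self])
    rw [List.drop_length] at h
    simpa using h.symm
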